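-- pv_equiv track=rewrite | github.com/alxwen711/contestSubmissionArchive | codechef/starters 96/c.py | solve
-- ===== SOURCE A (Python) =====
-- def solve(n,ar):
--     if n == 2: return "YES" if ar[0] == ar[1] else "NO" #base case
--     #adj check
--     for i in range(n):
--         if ar[(i-1) % n] + ar[(i+1) % n] < ar[i]: return "NO"
--     s = sum(ar) #must be even
--     if s % 2 == 1: return "NO"
--     if n % 2 == 0: #? idk if this segment is true???
--         return "YES" if sum(ar[::2])*2 == s else "NO"
--     else:
--         br = list()
--         index = 0
--         for i in range(n):
--             br.append(ar[index])
--             index = (index+2) % n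
--         half = n//2
--         u = sum(br[:half])
--         cr = [0]*n
--         index = n-1
--         ss = s//2
--         for j in range(n):
--             cr[index] = ss-u
--             if ss-u < 0: return "NO"
--             u -= br[j]
--             u += br[(half+j) % n]
--             index = (index+2) % n
--         for k in range(n):
--             if cr[k]+cr[(k+1) % n] != ar[k]: return "NO"
--     return "YES"
-- ===== SOURCE B (Python) =====
-- def solve(n, ar):
--     if n == 2:
--         return "YES" if ar[0] == ar[1] else "NO"
--     for i in range(n):
--         if ar[(i - 1) % n] + ar[(i + 1) % n] < ar[i]:
--             return "NO"
--     s = sum(ar)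
--     if s % 2 == 1:
--         return "NO"
--     if n % 2 == 0:
--         return "YES" if sum(ar[::2]) * 2 == s else "NO"
--     # odd n: the decomposition is forced: b[p] = s//2 - (ar[p+1] + ar[p+3] + ..., n//2 cyclic
--     # terms); read every window in O(1) from a table of step-2 suffix sums over two laps
--     ss = s // 2
--     h = n // 2
--     w = [0] * (2 * n + 2)
--     for x in range(2 * n - 1, -1, -1):
--         w[x] = w[x + 2] + ar[x % n]
--     b = [ss - (w[p + 1] - w[p + 1 + 2 * h]) for p in range(n)]
--     if any(x < 0 for x in b):
--         return "NO"
--     for k in range(n):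
--         if b[k] + b[(k + 1) % n] != ar[k]:
--             return "NO"
--     return "YES"
-- ===== Notes on version B (the rewrite author's own statement) =====
-- stated objective: alternative
-- what changed: The odd-n branch no longer builds the rotated every-other-element list br, slides a half-window sum and scatter-writes values into cr with a stepping index; B precomputes one table of step-2 suffix sums over two laps of the array and reads each forced value b[p] = s//2 - (w[p+1] - w[p+1+2*(n//2)]) in natural order, then checks nonnegativity and the cyclic constraints.
import Mathlib
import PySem

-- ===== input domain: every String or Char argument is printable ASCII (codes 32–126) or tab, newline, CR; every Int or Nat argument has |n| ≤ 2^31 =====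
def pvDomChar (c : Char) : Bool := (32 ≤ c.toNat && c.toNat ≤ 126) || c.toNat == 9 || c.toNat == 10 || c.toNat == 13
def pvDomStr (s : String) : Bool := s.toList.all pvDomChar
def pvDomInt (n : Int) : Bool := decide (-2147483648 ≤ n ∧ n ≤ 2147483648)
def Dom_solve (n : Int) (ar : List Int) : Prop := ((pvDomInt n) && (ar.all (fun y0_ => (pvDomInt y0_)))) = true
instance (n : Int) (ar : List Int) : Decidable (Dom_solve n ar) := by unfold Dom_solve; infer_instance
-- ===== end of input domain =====

-- B replaces A's odd-n machinery (rotated every-other-element list, sliding half-window sum,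
-- scatter-writes into cr) by computing each solution value directly from its alternating
-- cyclic window; an alternative decomposition of the same check (not claimed faster).

-- shared helper: ar[i] (indices produced by the loops are always in range under Pre_)
def aGet (ar : List Int) (i : Int) : Int := PySem.List.pyGetD ar i 0

-- shared: the cyclic adjacency pre-check loop (identical in Source A and Source B)
def adjBad (n : Int) (ar : List Int) : Bool :=
  (PySem.List.pyRange 0 n 1).any (fun i =>
    decide (aGet ar (PySem.Int.mod (i - 1) n) + aGet ar (PySem.Int.mod (i + 1) n) < aGet ar i))

-- shared: sum(ar[::2])
def evenIdxSum (ar : List Int) : Int := ((PySem.List.slice? ar none none 2).getD []).sum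

-- shared: the final verification loop (identical in Source A and Source B)
def verifyBad (n : Int) (ar cr : List Int) : Bool :=
  (PySem.List.pyRange 0 n 1).any (fun k =>
    decide (aGet cr k + aGet cr (PySem.Int.mod (k + 1) n) ≠ aGet ar k))

-- ===== PORT A =====
-- br: append ar[index], index stepping by 2 mod n
def brA (n : Int) (ar : List Int) : List Int :=
  ((PySem.List.pyRange 0 n 1).foldl
    (fun (st : List Int × Int) _ => (st.1 ++ [aGet ar st.2], PySem.Int.mod (st.2 + 2) n))
    ([], 0)).1

-- the j-loop: cr[index] = ss - u; early "return NO" when ss - u < 0; slide u; step index by 2 mod n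
def crA (br : List Int) (half n ss : Int) : List Int → List Int → Int → Int → Option (List Int)
  | [], cr, _, _ => some cr
  | j :: js, cr, u, index =>
      let cr' := PySem.List.pySetD cr index (ss - u)
      if ss - u < 0 then none
      else crA br half n ss js cr'
             (u - aGet br j + aGet br (PySem.Int.mod (half + j) n))
             (PySem.Int.mod (index + 2) n)

def oddA (n : Int) (ar : List Int) : String :=
  match crA (brA n ar) (PySem.Int.floordiv n 2) n (PySem.Int.floordiv ar.sum 2)
          (PySem.List.pyRange 0 n 1)
          (PySem.List.pyRepeat [0] n)
          (PySem.List.slice (brA n ar) none (some (PySem.Int.floordiv n 2))).sum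
          (n - 1) with
  | none => "NO"
  | some cr => if verifyBad n ar cr then "NO" else "YES"

def solve (n : Int) (ar : List Int) : String :=
  if n = 2 then (if aGet ar 0 = aGet ar 1 then "YES" else "NO")
  else if adjBad n ar then "NO"
  else if PySem.Int.mod ar.sum 2 = 1 then "NO"
  else if PySem.Int.mod n 2 = 0 then (if evenIdxSum ar * 2 = ar.sum then "YES" else "NO")
  else oddA n ar

-- ===== PORT B =====
-- w: step-2 suffix sums over two laps: w[x] = w[x+2] + ar[x % n], filled from x = 2n-1 down to 0
def wB (n : Int) (ar : List Int) : List Int :=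
  (PySem.List.pyRange (2 * n - 1) (-1) (-1)).foldl
    (fun w x => PySem.List.pySetD w x (aGet w (x + 2) + aGet ar (PySem.Int.mod x n)))
    (PySem.List.pyRepeat [0] (2 * n + 2))

-- b[p] = s//2 - (w[p+1] - w[p+1+2*(n//2)]), for p in range(n)
def bB (n : Int) (ar : List Int) : List Int :=
  (PySem.List.pyRange 0 n 1).map (fun p =>
    PySem.Int.floordiv ar.sum 2 -
      (aGet (wB n ar) (p + 1) - aGet (wB n ar) (p + 1 + 2 * PySem.Int.floordiv n 2)))

def oddB (n : Int) (ar : List Int) : String :=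
  if (bB n ar).any (fun x => decide (x < 0)) then "NO"
  else if verifyBad n ar (bB n ar) then "NO" else "YES"

def solve_alt (n : Int) (ar : List Int) : String :=
  if n = 2 then (if aGet ar 0 = aGet ar 1 then "YES" else "NO")
  else if adjBad n ar then "NO"
  else if PySem.Int.mod ar.sum 2 = 1 then "NO"
  else if PySem.Int.mod n 2 = 0 then (if evenIdxSum ar * 2 = ar.sum then "YES" else "NO")
  else oddB n ar

-- ===== PRECONDITION & SPEC =====
-- Pre_ is exactly where the Python A returns: for n > len(ar) (including n = 2 with fewer than
-- two elements) A raises IndexError; for every n ≤ len(ar) it returns normally.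
def Pre_solve (n : Int) (ar : List Int) : Prop := n ≤ (ar.length : Int)
instance (n : Int) (ar : List Int) : Decidable (Pre_solve n ar) := by unfold Pre_solve; infer_instance

def pvWitness_solve : Int × List Int := (3, [2, 2, 2])

def Spec_solve (n : Int) (ar : List Int) (out : String) : Prop := out = solve_alt n ar
instance (n : Int) (ar : List Int) (out : String) : Decidable (Spec_solve n ar out) := by unfold Spec_solve; infer_instance

-- ===== CLAIM (what is proved, stated in full; the proofs are below) =====
def Claim_equal_solve : Prop := ∀ (n : Int) (ar : List Int), Dom_solve n ar → Pre_solve n ar → Spec_solve n ar (solve n ar)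

-- ===== LEMMAS AND PROOFS =====

-- cyclic element access over the first N positions: gg N ar x = ar[x % N]
def gg (N : ℕ) (ar : List Int) (x : ℕ) : Int := ar.getD (x % N) 0

-- step-2 cyclic sum  S2 N ar m h = Σ_{i<h} gg N ar (m+2i)
def S2 (N : ℕ) (ar : List Int) (m h : ℕ) : Int := ((List.range h).map (fun i => gg N ar (m + 2 * i))).sum

-- the value A's loop stores at position p (and B computes directly)
def cdef (N : ℕ) (ar : List Int) (p : ℕ) : Int :=
  PySem.Int.floordiv ar.sum 2 - S2 N ar (p + 1) (N / 2)

-- A's sliding-window value before iteration t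
def uSeq (N : ℕ) (ar : List Int) (t : ℕ) : Int := S2 N ar (2 * t) (N / 2)

-- A's write position at iteration t
def idxA (N : ℕ) (t : ℕ) : ℕ := (N - 1 + 2 * t) % N

theorem gg_congr (N : ℕ) (ar : List Int) {a b : ℕ} (h : a % N = b % N) : gg N ar a = gg N ar b := by
  simp [gg, h]

theorem S2_succ (N : ℕ) (ar : List Int) (m h : ℕ) :
    S2 N ar m (h + 1) = S2 N ar m h + gg N ar (m + 2 * h) := by
  simp [S2, List.range_succ]

theorem S2_shift2 (N : ℕ) (ar : List Int) (m h : ℕ) :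
    S2 N ar (m + 2) h = S2 N ar m h - gg N ar m + gg N ar (m + 2 * h) := by
  induction h with
  | zero => simp [S2]
  | succ h ih =>
    rw [S2_succ, S2_succ, ih]
    have : m + 2 + 2 * h = m + 2 * (h + 1) := by omega
    rw [this]; ring

theorem S2_congr (N : ℕ) (ar : List Int) {m m' : ℕ} (h : m % N = m' % N) (hh : ℕ) :
    S2 N ar m hh = S2 N ar m' hh := by
  unfold S2
  apply congrArg
  apply List.map_congr_left
  intro i _
  exact gg_congr N ar (Nat.ModEq.add_right (2 * i) h)

theorem getD_set_same (l : List Int) (i : ℕ) (v : Int) (h : i < l.length) :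
    (l.set i v).getD i 0 = v := by
  simp [List.getD_eq_getElem?_getD, h]

theorem getD_set_other (l : List Int) (i p : ℕ) (v : Int) (h : i ≠ p) :
    (l.set i v).getD p 0 = l.getD p 0 := by
  simp [List.getD_eq_getElem?_getD, List.getElem?_set_ne h]

theorem getD_map_range' (f : ℕ → Int) {n j : ℕ} (h : j < n) :
    ((List.range n).map f).getD j 0 = f j := by
  simp [List.getD_eq_getElem?_getD, List.getElem?_map, List.getElem?_range h]

theorem brA_fold (N : ℕ) (ar : List Int) (hN1 : 1 ≤ N) : ∀ k, k ≤ N →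
    (PySem.List.pyRange 0 (k : Int) 1).foldl
        (fun (st : List Int × Int) _ => (st.1 ++ [aGet ar st.2], PySem.Int.mod (st.2 + 2) (N : Int)))
        ([], 0)
      = ((List.range k).map (fun i => gg N ar (2 * i)), ((2 * k % N : ℕ) : Int)) := by
  intro k
  induction k with
  | zero =>
    intro _
    rw [PySem.List.pyRange_one_eq_nil (by norm_num)]
    simp
  | succ k ih =>
    intro hk
    have hcast : ((k : Int) + 1) = ((k + 1 : ℕ) : Int) := by push_cast; ring
    rw [← hcast, PySem.List.pyRange_one_succ_right (by positivity), List.foldl_append,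
        ih (by omega)]
    simp only [List.foldl_cons, List.foldl_nil]
    have hget : aGet ar ((2 * k % N : ℕ) : Int) = gg N ar (2 * k) := by
      unfold aGet
      rw [PySem.List.pyGetD_natCast]
      rfl
    have hmod : PySem.Int.mod (((2 * k % N : ℕ) : Int) + 2) (N : Int)
        = ((2 * (k + 1) % N : ℕ) : Int) := by
      have h1 : (((2 * k % N : ℕ) : Int) + 2) = (((2 * k % N + 2 : ℕ)) : Int) := by
        push_cast; ring
      rw [h1, PySem.Int.mod_natCast]
      have h2 : (2 * k % N + 2) % N = 2 * (k + 1) % N := by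
        conv_lhs => rw [Nat.mod_add_mod]
        congr 1
      rw [h2]
    rw [hget, hmod, List.range_succ, List.map_append]
    rfl

theorem brA_eq (N : ℕ) (ar : List Int) (hN1 : 1 ≤ N) :
    brA (N : Int) ar = (List.range N).map (fun i => gg N ar (2 * i)) := by
  unfold brA
  rw [brA_fold N ar hN1 N le_rfl]

theorem half_floordiv (N : ℕ) :
    PySem.Int.floordiv (N : Int) 2 = ((N / 2 : ℕ) : Int) := by
  exact_mod_cast PySem.Int.floordiv_natCast N 2

theorem u0_eq (N : ℕ) (ar : List Int) (hN1 : 1 ≤ N) :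
    (PySem.List.slice (brA (N : Int) ar) none (some (PySem.Int.floordiv (N : Int) 2))).sum
      = uSeq N ar 0 := by
  rw [half_floordiv, PySem.List.slice_to_natCast, brA_eq N ar hN1, ← List.map_take,
      List.take_range]
  have hmin : min (N / 2) N = N / 2 := by omega
  rw [hmin]
  unfold uSeq S2
  apply congrArg
  apply List.map_congr_left
  intro i hi
  simp

theorem idxA_lt (N : ℕ) (hN1 : 1 ≤ N) (t : ℕ) : idxA N t < N :=
  Nat.mod_lt _ (by omega)

theorem idxA_inj (N : ℕ) (hodd : N % 2 = 1) {t t' : ℕ}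
    (ht : t < N) (ht' : t' < N) (h : idxA N t = idxA N t') : t = t' := by
  have h1 : N - 1 + 2 * t ≡ N - 1 + 2 * t' [MOD N] := h
  have h2 : 2 * t ≡ 2 * t' [MOD N] := Nat.ModEq.add_left_cancel rfl h1
  have hc : Nat.Coprime 2 N := Nat.coprime_two_left.mpr (Nat.odd_iff.mpr hodd)
  have h3 : t ≡ t' [MOD N] :=
    Nat.ModEq.cancel_left_of_coprime (by simpa [Nat.Coprime] using hc) h2
  have := h3
  unfold Nat.ModEq at this
  rw [Nat.mod_eq_of_lt ht, Nat.mod_eq_of_lt ht'] at this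
  exact this

theorem idxA_surj (N : ℕ) (hodd : N % 2 = 1) {p : ℕ} (hp : p < N) :
    ∃ t, t < N ∧ idxA N t = p := by
  have hN1 : 1 ≤ N := by omega
  refine ⟨(p + 1) * ((N + 1) / 2) % N, Nat.mod_lt _ (by omega), ?_⟩
  unfold idxA
  have step1 : (N - 1 + 2 * ((p + 1) * ((N + 1) / 2) % N)) % N
      = (N - 1 + 2 * ((p + 1) * ((N + 1) / 2))) % N := by
    have h := Nat.ModEq.add_left (N - 1)
      (Nat.ModEq.mul_left 2 (Nat.mod_modEq ((p + 1) * ((N + 1) / 2)) N))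
    unfold Nat.ModEq at h
    exact h
  have h2 : 2 * ((p + 1) * ((N + 1) / 2)) = (p + 1) * (N + 1) := by
    have he : 2 * ((N + 1) / 2) = N + 1 := by omega
    calc 2 * ((p + 1) * ((N + 1) / 2)) = (p + 1) * (2 * ((N + 1) / 2)) := by ring
      _ = (p + 1) * (N + 1) := by rw [he]
  have step2 : N - 1 + (p + 1) * (N + 1) = (N + p) + (p + 1) * N := by
    have e : (p + 1) * (N + 1) = (p + 1) * N + (p + 1) := by ring
    rw [e]
    generalize (p + 1) * N = q
    omega
  rw [step1, h2, step2, Nat.add_mul_mod_self_right, Nat.add_mod_left, Nat.mod_eq_of_lt hp]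

theorem crA_run (N : ℕ) (ar br : List Int) (hbr : br = (List.range N).map (fun i => gg N ar (2 * i)))
    (hodd : N % 2 = 1) (ss : Int) :
    ∀ d j (cr : List Int), d = N - j → j ≤ N → cr.length = N →
    (crA br ((N / 2 : ℕ) : Int) (N : Int) ss
        (PySem.List.pyRange (j : Int) (N : Int) 1) cr (uSeq N ar j) ((idxA N j : ℕ) : Int)
      = none ↔ ∃ t, j ≤ t ∧ t < N ∧ ss - uSeq N ar t < 0)
    ∧ (∀ crF, crA br ((N / 2 : ℕ) : Int) (N : Int) ss
        (PySem.List.pyRange (j : Int) (N : Int) 1) cr (uSeq N ar j) ((idxA N j : ℕ) : Int)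
      = some crF →
        crF.length = N ∧
        (∀ t, j ≤ t → t < N → crF.getD (idxA N t) 0 = ss - uSeq N ar t) ∧
        (∀ p, (∀ t, j ≤ t → t < N → idxA N t ≠ p) → crF.getD p 0 = cr.getD p 0)) := by
  have hN1 : 1 ≤ N := by omega
  intro d
  induction d with
  | zero =>
    intro j cr hd hj hlen
    have hjL : j = N := by omega
    subst hjL
    rw [PySem.List.pyRange_one_eq_nil le_rfl]
    constructor
    · constructor
      · intro h; exact absurd h (by simp [crA])
      · rintro ⟨t, h1, h2, _⟩; omega
    · intro crF h
      have : crF = cr := by simpa [crA] using h.symm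
      subst this
      exact ⟨hlen, fun t h1 h2 => absurd h2 (by omega), fun p _ => rfl⟩
  | succ d ih =>
    intro j cr hd hj hlen
    have hjL : j < N := by omega
    have hcons : PySem.List.pyRange (j : Int) (N : Int) 1
        = (j : Int) :: PySem.List.pyRange ((j : Int) + 1) (N : Int) 1 :=
      PySem.List.pyRange_one_cons (by exact_mod_cast hjL)
    have hj1 : ((j : Int) + 1) = ((j + 1 : ℕ) : Int) := by push_cast; ring
    have hget1 : aGet br (j : Int) = gg N ar (2 * j) := by
      unfold aGet
      rw [PySem.List.pyGetD_natCast, hbr]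
      have := getD_map_range' (fun i => gg N ar (2 * i)) hjL
      simpa using this
    have hget2 : aGet br (PySem.Int.mod (((N / 2 : ℕ) : Int) + (j : Int)) (N : Int))
        = gg N ar (2 * j + 2 * (N / 2)) := by
      unfold aGet
      have hc : (((N / 2 : ℕ) : Int) + (j : Int)) = ((N / 2 + j : ℕ) : Int) := by
        push_cast; ring
      rw [hc, PySem.Int.mod_natCast, PySem.List.pyGetD_natCast, hbr]
      have hlt : (N / 2 + j) % N < N := Nat.mod_lt _ (by omega)
      have := getD_map_range' (fun i => gg N ar (2 * i)) hlt
      rw [List.getD_eq_getElem?_getD] at this ⊢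
      rw [this]
      apply gg_congr
      have h1 : 2 * ((N / 2 + j) % N) ≡ 2 * (N / 2 + j) [MOD N] :=
        Nat.ModEq.mul_left 2 (Nat.mod_modEq _ _)
      have h2 : 2 * (N / 2 + j) = 2 * j + 2 * (N / 2) := by ring
      rw [← h2]
      exact h1
    have hu : uSeq N ar j - aGet br (j : Int)
          + aGet br (PySem.Int.mod (((N / 2 : ℕ) : Int) + (j : Int)) (N : Int))
        = uSeq N ar (j + 1) := by
      rw [hget1, hget2]
      unfold uSeq
      have e : 2 * (j + 1) = 2 * j + 2 := by ring
      rw [e, S2_shift2]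
    have hidx : PySem.Int.mod (((idxA N j : ℕ) : Int) + 2) (N : Int)
        = ((idxA N (j + 1) : ℕ) : Int) := by
      have hc : (((idxA N j : ℕ) : Int) + 2) = ((idxA N j + 2 : ℕ) : Int) := by push_cast; ring
      rw [hc, PySem.Int.mod_natCast]
      congr 1
      unfold idxA
      conv_lhs => rw [Nat.mod_add_mod]
      congr 1
    have hset : PySem.List.pySetD cr ((idxA N j : ℕ) : Int) (ss - uSeq N ar j)
        = cr.set (idxA N j) (ss - uSeq N ar j) := by
      simp
    rw [hcons]
    by_cases hneg : ss - uSeq N ar j < 0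
    · have hnone : crA br ((N / 2 : ℕ) : Int) (N : Int) ss
            ((j : Int) :: PySem.List.pyRange ((j : Int) + 1) (N : Int) 1) cr
            (uSeq N ar j) ((idxA N j : ℕ) : Int) = none := by
        simp only [crA, hset, if_pos hneg]
      rw [hnone]
      constructor
      · constructor
        · intro _; exact ⟨j, le_rfl, hjL, hneg⟩
        · intro _; rfl
      · intro crF h
        exact absurd h (by simp)
    · have hstep : crA br ((N / 2 : ℕ) : Int) (N : Int) ss
              ((j : Int) :: PySem.List.pyRange ((j : Int) + 1) (N : Int) 1) cr
              (uSeq N ar j) ((idxA N j : ℕ) : Int)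
          = crA br ((N / 2 : ℕ) : Int) (N : Int) ss
              (PySem.List.pyRange ((j + 1 : ℕ) : Int) (N : Int) 1)
              (cr.set (idxA N j) (ss - uSeq N ar j)) (uSeq N ar (j + 1)) ((idxA N (j + 1) : ℕ) : Int) := by
        simp only [crA, hset, if_neg hneg, hu, hidx, hj1]
      rw [hstep]
      have hlen' : (cr.set (idxA N j) (ss - uSeq N ar j)).length = N := by
        simp [hlen]
      obtain ⟨ihn, ihs⟩ := ih (j + 1) (cr.set (idxA N j) (ss - uSeq N ar j)) (by omega) (by omega) hlen'
      constructor
      · rw [ihn]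
        constructor
        · rintro ⟨t, h1, h2, h3⟩; exact ⟨t, by omega, h2, h3⟩
        · rintro ⟨t, h1, h2, h3⟩
          rcases Nat.eq_or_lt_of_le h1 with heq | hlt
          · subst heq; exact absurd h3 hneg
          · exact ⟨t, by omega, h2, h3⟩
      · intro crF h
        obtain ⟨hL, hwr, hun⟩ := ihs crF h
        refine ⟨hL, ?_, ?_⟩
        · intro t h1 h2
          rcases Nat.eq_or_lt_of_le h1 with heq | hlt
          · subst heq
            have hne : ∀ t', j + 1 ≤ t' → t' < N → idxA N t' ≠ idxA N j := by
              intro t' ht1 ht2 heq2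
              have := idxA_inj N hodd ht2 h2 heq2
              omega
            rw [hun (idxA N j) hne]
            exact getD_set_same cr (idxA N j) _ (by rw [hlen]; exact idxA_lt N hN1 j)
          · exact hwr t (by omega) h2
        · intro p hp
          rw [hun p (fun t' h1 h2 => hp t' (by omega) h2)]
          exact getD_set_other cr (idxA N j) p _ (hp j le_rfl hjL)

theorem cdef_idxA (N : ℕ) (ar : List Int) (hodd : N % 2 = 1) (t : ℕ) :
    cdef N ar (idxA N t) = PySem.Int.floordiv ar.sum 2 - uSeq N ar t := by
  unfold cdef uSeq
  have hmod : (idxA N t + 1) % N = (2 * t) % N := by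
    unfold idxA
    conv_lhs => rw [Nat.mod_add_mod]
    have e : N - 1 + 2 * t + 1 = N + 2 * t := by omega
    rw [e, Nat.add_mod_left]
  rw [S2_congr N ar hmod]

theorem verify_congr (N : ℕ) (ar crF bb : List Int) (hN1 : 1 ≤ N)
    (h : ∀ p, p < N → crF.getD p 0 = bb.getD p 0) :
    verifyBad (N : Int) ar crF = verifyBad (N : Int) ar bb := by
  unfold verifyBad
  apply PySem.List.any_congr_mem
  intro x hx
  rw [PySem.List.mem_pyRange_one] at hx
  obtain ⟨k, rfl⟩ : ∃ k : ℕ, x = (k : Int) := ⟨x.toNat, (Int.toNat_of_nonneg hx.1).symm⟩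
  have hk : k < N := by exact_mod_cast hx.2
  have hc : ((k : Int) + 1) = ((k + 1 : ℕ) : Int) := by push_cast; ring
  unfold aGet
  rw [hc, PySem.Int.mod_natCast]
  simp only [PySem.List.pyGetD_natCast]
  rw [h k hk, h ((k + 1) % N) (Nat.mod_lt _ (by omega))]

theorem S2_front (N : ℕ) (ar : List Int) (m h : ℕ) :
    S2 N ar m (h + 1) = gg N ar m + S2 N ar (m + 2) h := by
  rw [S2_shift2, S2_succ]
  ring

theorem S2_split (N : ℕ) (ar : List Int) (m a b : ℕ) :
    S2 N ar m (a + b) = S2 N ar m a + S2 N ar (m + 2 * a) b := by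
  induction b with
  | zero => simp [S2]
  | succ b ih =>
    have e : a + (b + 1) = (a + b) + 1 := by omega
    rw [e, S2_succ, ih, S2_succ]
    have e2 : m + 2 * a + 2 * b = m + 2 * (a + b) := by omega
    rw [e2]
    ring

-- number of step-2 terms of the suffix table at index x
def cnt (N x : ℕ) : ℕ := (2 * N - x + 1) / 2

-- the value the w table holds at index x
def Efun (N : ℕ) (ar : List Int) (x : ℕ) : Int := S2 N ar x (cnt N x)

theorem Efun_high (N : ℕ) (ar : List Int) {y : ℕ} (hy : 2 * N ≤ y) : Efun N ar y = 0 := by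
  have : cnt N y = 0 := by unfold cnt; omega
  unfold Efun
  rw [this]
  simp [S2]

theorem wB_fold (N : ℕ) (ar : List Int) (hN1 : 1 ≤ N) :
    ∀ x0, x0 ≤ 2 * N - 1 → ∀ w : List Int, w.length = 2 * N + 2 →
    (∀ y, x0 < y → w.getD y 0 = Efun N ar y) →
    ∀ y, ((PySem.List.pyRange (x0 : Int) (-1) (-1)).foldl
        (fun w x => PySem.List.pySetD w x (aGet w (x + 2) + aGet ar (PySem.Int.mod x (N : Int))))
        w).getD y 0 = Efun N ar y := by
  intro x0
  induction x0 with
  | zero =>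
    intro _ w hlen hinv y
    simp only [Nat.cast_zero]
    rw [PySem.List.pyRange_neg_one_cons (by norm_num)]
    rw [show ((0 : Int) - 1) = -1 by ring, PySem.List.pyRange_neg_one_eq_nil (by norm_num)]
    simp only [List.foldl_cons, List.foldl_nil]
    have hval : aGet w ((0 : Int) + 2) + aGet ar (PySem.Int.mod 0 (N : Int)) = Efun N ar 0 := by
      unfold aGet
      have h2 : ((0 : Int) + 2) = ((2 : ℕ) : Int) := by norm_num
      have hm : PySem.Int.mod (0 : Int) (N : Int) = ((0 % N : ℕ) : Int) := by
        exact_mod_cast PySem.Int.mod_natCast 0 N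
      rw [h2, hm]
      simp only [PySem.List.pyGetD_natCast]
      rw [hinv 2 (by omega)]
      have hc : cnt N 0 = cnt N 2 + 1 := by unfold cnt; omega
      unfold Efun
      rw [hc, S2_front]
      have : (0 : ℕ) + 2 = 2 := by omega
      rw [this]
      unfold gg
      ring
    have hset : PySem.List.pySetD w (0 : Int) (aGet w ((0 : Int) + 2) + aGet ar (PySem.Int.mod 0 (N : Int)))
        = w.set 0 (Efun N ar 0) := by
      rw [hval]
      have : ((0 : Int)) = (((0 : ℕ)) : Int) := rfl
      rw [this, PySem.List.pySetD_natCast]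
    rw [hset]
    by_cases hy : y = 0
    · subst hy
      exact getD_set_same w 0 _ (by omega)
    · rw [getD_set_other w 0 y _ (by omega)]
      exact hinv y (by omega)
  | succ x0 ih =>
    intro hx w hlen hinv y
    have hcast : ((x0 + 1 : ℕ) : Int) = (x0 : Int) + 1 := by push_cast; ring
    rw [hcast, PySem.List.pyRange_neg_one_cons (by omega)]
    simp only [List.foldl_cons]
    have hval : aGet w ((x0 : Int) + 1 + 2) + aGet ar (PySem.Int.mod ((x0 : Int) + 1) (N : Int))
        = Efun N ar (x0 + 1) := by
      unfold aGet
      have h2 : ((x0 : Int) + 1 + 2) = ((x0 + 3 : ℕ) : Int) := by push_cast; ring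
      have h3 : ((x0 : Int) + 1) = ((x0 + 1 : ℕ) : Int) := by push_cast; ring
      rw [h2, h3, PySem.Int.mod_natCast]
      simp only [PySem.List.pyGetD_natCast]
      rw [hinv (x0 + 3) (by omega)]
      have hc : cnt N (x0 + 1) = cnt N (x0 + 3) + 1 := by unfold cnt; omega
      unfold Efun
      rw [hc, S2_front]
      have : x0 + 1 + 2 = x0 + 3 := by omega
      rw [this]
      unfold gg
      ring
    have hset : PySem.List.pySetD w ((x0 : Int) + 1)
          (aGet w ((x0 : Int) + 1 + 2) + aGet ar (PySem.Int.mod ((x0 : Int) + 1) (N : Int)))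
        = w.set (x0 + 1) (Efun N ar (x0 + 1)) := by
      rw [hval]
      have h3 : ((x0 : Int) + 1) = ((x0 + 1 : ℕ) : Int) := by push_cast; ring
      rw [h3, PySem.List.pySetD_natCast]
    rw [hset]
    rw [show ((x0 : Int) + 1 - 1) = (x0 : Int) by ring]
    apply ih (by omega) _ (by simp [hlen])
    intro z hz
    by_cases hzx : z = x0 + 1
    · subst hzx
      exact getD_set_same w (x0 + 1) _ (by omega)
    · rw [getD_set_other w (x0 + 1) z _ (by omega)]
      exact hinv z (by omega)

theorem wB_getD (N : ℕ) (ar : List Int) (hN1 : 1 ≤ N) (y : ℕ) :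
    (wB (N : Int) ar).getD y 0 = Efun N ar y := by
  unfold wB
  have e1 : (2 * (N : Int) - 1) = ((2 * N - 1 : ℕ) : Int) := by
    have : 1 ≤ 2 * N := by omega
    push_cast [this]
    ring
  have e2 : PySem.List.pyRepeat [(0 : Int)] (2 * (N : Int) + 2) = List.replicate (2 * N + 2) (0 : Int) := by
    rw [PySem.List.pyRepeat_singleton]
    congr 1
  rw [e1, e2]
  apply wB_fold N ar hN1 (2 * N - 1) le_rfl _ (by simp)
  intro z hz
  rw [List.getD_eq_getElem?_getD]
  have hef : Efun N ar z = 0 := Efun_high N ar (by omega)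
  rw [hef]
  by_cases hzl : z < 2 * N + 2
  · simp [hzl]
  · rw [List.getElem?_eq_none (by simp; omega)]
    rfl

theorem bB_eq (N : ℕ) (ar : List Int) (hN1 : 1 ≤ N) (hodd : N % 2 = 1) :
    bB (N : Int) ar = (List.range N).map (cdef N ar) := by
  unfold bB
  rw [PySem.List.pyRange_one, half_floordiv]
  simp only [Int.sub_zero, Int.toNat_natCast, List.map_map]
  apply List.map_congr_left
  intro k hk
  rw [List.mem_range] at hk
  simp only [Function.comp]
  have hc1 : ((0 : Int) + (k : ℕ) + 1) = ((k + 1 : ℕ) : Int) := by push_cast; ring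
  have hc2 : ((0 : Int) + (k : ℕ) + 1 + 2 * ((N / 2 : ℕ) : Int)) = ((k + 1 + 2 * (N / 2) : ℕ) : Int) := by
    push_cast; ring
  unfold aGet
  rw [hc2, hc1]
  simp only [PySem.List.pyGetD_natCast]
  rw [wB_getD N ar hN1, wB_getD N ar hN1]
  unfold cdef Efun
  have hcnt : cnt N (k + 1) = N / 2 + cnt N (k + 1 + 2 * (N / 2)) := by
    unfold cnt; omega
  rw [hcnt, S2_split]
  ring

theorem bB_any_neg (N : ℕ) (ar : List Int) (hN1 : 1 ≤ N) (hodd : N % 2 = 1) :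
    ((bB (N : Int) ar).any (fun x => decide (x < 0)) = true) ↔ ∃ p, p < N ∧ cdef N ar p < 0 := by
  rw [bB_eq N ar hN1 hodd]
  simp only [List.any_eq_true, List.mem_map, List.mem_range, decide_eq_true_eq]
  constructor
  · rintro ⟨x, ⟨p, hp, rfl⟩, hneg⟩
    exact ⟨p, hp, hneg⟩
  · rintro ⟨p, hp, hneg⟩
    exact ⟨cdef N ar p, ⟨p, hp, rfl⟩, hneg⟩

theorem odd_nonpos (n : Int) (ar : List Int) (hn : n ≤ 0) : oddA n ar = oddB n ar := by
  have hnil : PySem.List.pyRange 0 n 1 = [] := PySem.List.pyRange_one_eq_nil hn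
  unfold oddA oddB bB brA verifyBad
  rw [hnil]
  simp [crA]

theorem oddA_eq_oddB (N : ℕ) (ar : List Int) (hodd : N % 2 = 1) :
    oddA (N : Int) ar = oddB (N : Int) ar := by
  have hN1 : 1 ≤ N := by omega
  unfold oddA oddB
  rw [u0_eq N ar hN1, half_floordiv, bB_eq N ar hN1 hodd]
  have einit : PySem.List.pyRepeat [(0 : Int)] (N : Int) = List.replicate N (0 : Int) := by
    rw [PySem.List.pyRepeat_singleton]
    simp
  have eidx : ((N : Int) - 1) = ((idxA N 0 : ℕ) : Int) := by
    have h1 : idxA N 0 = N - 1 := by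
      unfold idxA
      rw [Nat.mul_zero, Nat.add_zero, Nat.mod_eq_of_lt (by omega)]
    rw [h1, Nat.cast_sub hN1]
    simp
  rw [einit, eidx]
  have hrun := crA_run N ar (brA (N : Int) ar) (brA_eq N ar hN1) hodd
    (PySem.Int.floordiv ar.sum 2) N 0 (List.replicate N 0)
    (by omega) (by omega) (by simp)
  simp only [Nat.cast_zero] at hrun
  obtain ⟨hiff, hsome⟩ := hrun
  have hbgetD : ∀ p, p < N → ((List.range N).map (cdef N ar)).getD p 0 = cdef N ar p :=
    fun p hp => getD_map_range' _ hp
  cases hcr : crA (brA (N : Int) ar) ((N / 2 : ℕ) : Int) (N : Int)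
      (PySem.Int.floordiv ar.sum 2) (PySem.List.pyRange 0 (N : Int) 1)
      (List.replicate N 0) (uSeq N ar 0) ((idxA N 0 : ℕ) : Int) with
  | none =>
    obtain ⟨t, _, htL, hneg⟩ := hiff.mp hcr
    have hc : cdef N ar (idxA N t) < 0 := by
      rw [cdef_idxA N ar hodd t]
      exact hneg
    have hany : ((List.range N).map (cdef N ar)).any (fun x => decide (x < 0)) = true := by
      rw [← bB_eq N ar hN1 hodd]
      exact (bB_any_neg N ar hN1 hodd).mpr ⟨idxA N t, idxA_lt N hN1 t, hc⟩
    rw [if_pos hany]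
  | some crF =>
    obtain ⟨hlenF, hwr, _⟩ := hsome crF hcr
    have hnone_not : ¬ ∃ t, 0 ≤ t ∧ t < N ∧ PySem.Int.floordiv ar.sum 2 - uSeq N ar t < 0 := by
      intro hex
      have := hiff.mpr hex
      rw [hcr] at this
      simp at this
    have hminF : ¬ (((List.range N).map (cdef N ar)).any (fun x => decide (x < 0)) = true) := by
      intro hh
      rw [← bB_eq N ar hN1 hodd, bB_any_neg N ar hN1 hodd] at hh
      obtain ⟨p, hp, hneg⟩ := hh
      obtain ⟨t, htL, rfl⟩ := idxA_surj N hodd hp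
      exact hnone_not ⟨t, by omega, htL, by rw [← cdef_idxA N ar hodd t]; exact hneg⟩
    rw [if_neg hminF]
    have hcrgetD : ∀ p, p < N → crF.getD p 0 = ((List.range N).map (cdef N ar)).getD p 0 := by
      intro p hp
      obtain ⟨t, htL, rfl⟩ := idxA_surj N hodd hp
      rw [hwr t (by omega) htL, hbgetD _ hp, cdef_idxA N ar hodd t]
    show (if verifyBad (N : Int) ar crF = true then "NO" else "YES") = _
    rw [verify_congr N ar crF ((List.range N).map (cdef N ar)) hN1 hcrgetD]

-- ===== VERDICT (by name: the statement is the Claim_ definition above) =====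
theorem solve_spec : Claim_equal_solve := by
  intro n ar _hdom _hpre
  unfold Spec_solve
  unfold solve solve_alt
  by_cases h1 : n = 2
  · rw [if_pos h1, if_pos h1]
  rw [if_neg h1, if_neg h1]
  by_cases h2 : adjBad n ar = true
  · rw [if_pos h2, if_pos h2]
  rw [if_neg h2, if_neg h2]
  by_cases h3 : PySem.Int.mod ar.sum 2 = 1
  · rw [if_pos h3, if_pos h3]
  rw [if_neg h3, if_neg h3]
  by_cases h4 : PySem.Int.mod n 2 = 0
  · rw [if_pos h4, if_pos h4]
  rw [if_neg h4, if_neg h4]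
  by_cases hn0 : n ≤ 0
  · exact odd_nonpos n ar hn0
  · have hpos : 0 < n := by omega
    obtain ⟨N, rfl⟩ : ∃ N : ℕ, n = (N : Int) := ⟨n.toNat, (Int.toNat_of_nonneg (by omega)).symm⟩
    have hodd : N % 2 = 1 := by
      have hm : PySem.Int.mod (N : Int) 2 = ((N % 2 : ℕ) : Int) := by
        exact_mod_cast PySem.Int.mod_natCast N 2
      rw [hm] at h4
      have : (N % 2 : ℕ) ≠ 0 := by exact_mod_cast h4
      omega
    exact oddA_eq_oddB N ar hodd
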